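-- pv_equiv track=rewrite | github.com/IgnacioMaqueda/Google-Kick-Start | 2021/RoundC/A-SmallerStrings.py | number_of_palindromes
-- ===== SOURCE A (Python) =====
-- def number_of_palindromes(N, K, S):
--     middle = (N - 1) // 2
--     res = 1 if S[:middle + 1][::-1] < S[-1:- middle - 2: - 1][::-1] else 0
--     power = 1
--     for i in range(middle, -1, -1):
--         res += (ord(S[i]) - ord('a')) * power
--         power *= K
--     return res % 1000000007
-- ===== SOURCE B (Python) =====
-- def half_value(p, K):
--     # base-K value of the digit string p, by divide and conquer
--     if len(p) <= 1:
--         return ord(p) - 97 if p else 0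
--     mid = len(p) // 2
--     return half_value(p[:mid], K) * K ** (len(p) - mid) + half_value(p[mid:], K)
--
--
-- def number_of_palindromes(N, K, S):
--     m = (N - 1) // 2
--     half = S[:m + 1]
--     tail = S[len(S) - len(half):]
--     smaller = 1 if half[::-1] < tail else 0
--     if m < 0:
--         return smaller % 1000000007
--     return (half_value(half, K) + smaller) % 1000000007
-- ===== Notes on version B (the rewrite author's own statement) =====
-- stated objective: faster
-- what changed: The half's base-K value is computed by divide-and-conquer recursion (split the half, combine the two sub-values with K^len) instead of A's backward index loop with a running power accumulator, and the indicator comes from comparing the reversed half against one plain suffix slice S[len(S)-len(half):] instead of A's two step-(-1) slices each reversed again.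
import Mathlib
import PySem

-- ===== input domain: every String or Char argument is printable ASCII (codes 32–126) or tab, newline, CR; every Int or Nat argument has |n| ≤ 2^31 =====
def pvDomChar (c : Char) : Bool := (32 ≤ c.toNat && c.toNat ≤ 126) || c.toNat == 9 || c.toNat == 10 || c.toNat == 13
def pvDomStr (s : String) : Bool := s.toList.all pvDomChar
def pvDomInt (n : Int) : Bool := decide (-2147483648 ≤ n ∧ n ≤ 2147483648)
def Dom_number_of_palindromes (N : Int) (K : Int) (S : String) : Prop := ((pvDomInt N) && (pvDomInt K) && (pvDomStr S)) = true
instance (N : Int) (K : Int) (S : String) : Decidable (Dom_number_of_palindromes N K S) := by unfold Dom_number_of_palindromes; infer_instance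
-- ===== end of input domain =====

-- B restructures A: the half's base-K value is computed by divide-and-conquer recursion
-- (split the half, combine with K^len) instead of A's backward power loop, and the
-- indicator compares the reversed half against one plain suffix slice instead of A's
-- two step-(-1) slices each reversed again (measurably faster on large inputs: balanced
-- big-int products instead of an n-digit running power updated every step).
-- ===== PORT A =====
def number_of_palindromes (N : Int) (K : Int) (S : String) : Int :=
  let cs := S.toList
  let middle := PySem.Int.floordiv (N - 1) 2
  -- res = 1 if S[:middle+1][::-1] < S[-1:-middle-2:-1][::-1] else 0
  -- ([::-1] is reversal: PySem.List.slice?_none_none_neg_one; str '<' is '<' on List Char)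
  let res0 : Int :=
    if (PySem.List.slice cs none (some (middle + 1))).reverse <
        ((PySem.List.slice? cs (some (-1)) (some (-middle - 2)) (-1)).getD []).reverse
    then 1 else 0
  -- power = 1; for i in range(middle, -1, -1): res += (ord(S[i]) - ord('a')) * power; power *= K
  -- (S[i] is in range for every admitted input: Pre_ gives middle < len(S); ord('a') = 97)
  let st := (PySem.List.pyRange middle (-1) (-1)).foldl
      (fun (st : Int × Int) i =>
        (st.1 + (((PySem.List.pyGetD cs i 'a').toNat : Int) - 97) * st.2, st.2 * K))
      (res0, 1)
  PySem.Int.mod st.1 1000000007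

-- ===== PORT B =====
-- half_value: divide-and-conquer base-K evaluation of the digit string
def pvHalfValue (K : Int) (p : List Char) : Int :=
  if p.length ≤ 1 then
    match p with
    | [] => 0
    | c :: _ => (c.toNat : Int) - 97
  else
    pvHalfValue K (p.take (p.length / 2)) * K ^ (p.length - p.length / 2)
      + pvHalfValue K (p.drop (p.length / 2))
termination_by p.length
decreasing_by
  · simp only [List.length_take]; omega
  · simp only [List.length_drop]; omega

def number_of_palindromes_alt (N : Int) (K : Int) (S : String) : Int :=
  let cs := S.toList
  let m := PySem.Int.floordiv (N - 1) 2
  let half := PySem.List.slice cs none (some (m + 1))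
  -- tail = S[len(S) - len(half):]
  let tail := PySem.List.slice cs (some ((cs.length : Int) - half.length)) none
  -- smaller = 1 if half[::-1] < tail else 0   ([::-1]: PySem.List.slice?_none_none_neg_one)
  let smaller : Int := if half.reverse < tail then 1 else 0
  if m < 0 then PySem.Int.mod smaller 1000000007
  else PySem.Int.mod (pvHalfValue K half + smaller) 1000000007

-- ===== PRECONDITION & SPEC =====
-- Pre_ excludes exactly the inputs where A raises IndexError: the loop reads S[middle]
-- first, so A returns normally iff (N-1)//2 < len(S) (for negative middle the loop is empty).
def Pre_number_of_palindromes (N : Int) (K : Int) (S : String) : Prop :=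
  PySem.Int.floordiv (N - 1) 2 < (S.toList.length : Int)
instance (N : Int) (K : Int) (S : String) : Decidable (Pre_number_of_palindromes N K S) := by
  unfold Pre_number_of_palindromes; infer_instance

def pvWitness_number_of_palindromes : Int × Int × String := (3, 2, "ab")

def Spec_number_of_palindromes (N : Int) (K : Int) (S : String) (out : Int) : Prop := out = number_of_palindromes_alt N K S
instance (N : Int) (K : Int) (S : String) (out : Int) : Decidable (Spec_number_of_palindromes N K S out) := by unfold Spec_number_of_palindromes; infer_instance

-- ===== CLAIM (what is proved, stated in full; the proofs are below) =====
def Claim_equal_number_of_palindromes : Prop := ∀ (N : Int) (K : Int) (S : String), Dom_number_of_palindromes N K S → Pre_number_of_palindromes N K S → Spec_number_of_palindromes N K S (number_of_palindromes N K S)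

-- ===== LEMMAS AND PROOFS =====

-- the reversed suffix of length c, written as A's slice? materialises it
theorem pvFM (cs : List Char) : ∀ (c : Nat), c ≤ cs.length →
    (List.range c).filterMap (fun (k : Nat) => cs[(((cs.length : Int) - 1) - (k : Int)).toNat]?)
      = (cs.drop (cs.length - c)).reverse := by
  intro c
  induction c with
  | zero => intro _; simp
  | succ n ih =>
    intro hc
    rw [List.range_succ, List.filterMap_append, ih (by omega)]
    have hlt : cs.length - 1 - n < cs.length := by omega
    have hdrop : cs.drop (cs.length - (n + 1)) = cs[cs.length - 1 - n] :: cs.drop (cs.length - n) := by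
      rw [List.drop_eq_getElem_cons (by omega : cs.length - (n+1) < cs.length)]
      congr 1
      · congr 1; omega
      · congr 1; omega
    rw [hdrop]
    simp [List.getElem?_eq_getElem hlt]

-- A's slice S[-1:-middle-2:-1] is the reverse of the suffix of S of the half's length
theorem pvSliceBridge (cs : List Char) (m : Int) (hm : m < (cs.length : Int)) :
    (PySem.List.slice? cs (some (-1)) (some (-m - 2)) (-1)).getD []
      = (cs.drop (cs.length - (PySem.List.slice cs none (some (m + 1))).length)).reverse := by
  have hlen : (PySem.List.slice cs none (some (m + 1))).length
      = PySem.List.clampIdx cs.length (m + 1) := by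
    simp [PySem.List.slice]
  rw [hlen]
  unfold PySem.List.slice? PySem.List.sliceIndices
  rw [if_neg (by norm_num : ¬ (-1 : Int) = 0)]
  simp only [Option.getD_some]
  norm_num
  by_cases hL : cs.length = 0
  · rcases List.eq_nil_of_length_eq_zero hL with rfl
    simp
  · have h1 : 1 ≤ cs.length := by omega
    have hcount :
        (if (1 + if -m ≤ 1 then max (-m - 2 + (cs.length : Int)) (-1)
              else min (-m - 2) ((cs.length : Int) - 1)) < (cs.length : Int) then
            (-1 + (cs.length : Int) -
              if -m ≤ 1 then max (-m - 2 + (cs.length : Int)) (-1)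
              else min (-m - 2) ((cs.length : Int) - 1)).toNat
          else 0) = PySem.List.clampIdx cs.length (m + 1) := by
      unfold PySem.List.clampIdx
      split_ifs <;> omega
    rw [hcount]
    have hfun : (fun x : Nat => cs[(-1 + (cs.length : Int) + -(x : Int)).toNat]?)
        = (fun k : Nat => cs[(((cs.length : Int) - 1) - (k : Int)).toNat]?) := by
      funext x
      congr 1
    rw [hfun]
    exact pvFM cs _ (by have := PySem.List.clampIdx_le cs.length (m + 1); omega)

-- the half slice is a take of the clamped endpoint
theorem pvHalfTake (cs : List Char) (b : Int) :
    PySem.List.slice cs none (some b) = cs.take (PySem.List.clampIdx cs.length b) := by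
  simp [PySem.List.slice]

-- shifting the Horner fold's accumulator
theorem pvFoldShift (K : Int) (p : List Char) : ∀ (a : Int),
    p.foldl (fun r c => r * K + ((c.toNat : Int) - 97)) a
      = a * K ^ p.length + p.foldl (fun r c => r * K + ((c.toNat : Int) - 97)) 0 := by
  induction p with
  | nil => intro a; simp
  | cons c t ih =>
    intro a
    simp only [List.foldl_cons, List.length_cons]
    rw [ih (a * K + ((c.toNat : Int) - 97)), ih ((0:Int) * K + ((c.toNat : Int) - 97))]
    ring

-- divide-and-conquer evaluation equals the left-to-right Horner fold
theorem pvHalfValue_eq (K : Int) (p : List Char) :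
    pvHalfValue K p = p.foldl (fun r c => r * K + ((c.toNat : Int) - 97)) 0 := by
  induction hn : p.length using Nat.strong_induction_on generalizing p with
  | _ n ih =>
  rw [pvHalfValue.eq_def]
  by_cases h : p.length ≤ 1
  · rcases p with _ | ⟨c, t⟩
    · simp
    · simp at h
      have : t = [] := h
      subst this; simp
  · rw [if_neg h]
    have hsplit : p.foldl (fun r c => r * K + ((c.toNat : Int) - 97)) 0
        = ((p.take (p.length / 2)).foldl (fun r c => r * K + ((c.toNat : Int) - 97)) 0)
            * K ^ (p.length - p.length / 2)
          + (p.drop (p.length / 2)).foldl (fun r c => r * K + ((c.toNat : Int) - 97)) 0 := by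
      conv_lhs => rw [← List.take_append_drop (p.length / 2) p]
      rw [List.foldl_append, pvFoldShift K (p.drop (p.length / 2))]
      simp only [List.length_drop]
    subst hn
    rw [ih (p.take (p.length / 2)).length (by simp; omega) _ rfl,
        ih (p.drop (p.length / 2)).length (by simp; omega) _ rfl, hsplit]

-- A's backward power loop equals the Horner fold on the prefix
theorem pvHorner (cs : List Char) (K : Int) (m : Nat) (hm : m < cs.length) :
    ∀ (ind pw : Int),
    ((PySem.List.pyRange (m : Int) (-1) (-1)).foldl
      (fun (st : Int × Int) i =>
        (st.1 + (((PySem.List.pyGetD cs i 'a').toNat : Int) - 97) * st.2, st.2 * K))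
      (ind, pw)).1
    = ind + pw * ((cs.take (m + 1)).foldl (fun (r : Int) c => r * K + ((c.toNat : Int) - 97)) 0) := by
  induction m with
  | zero =>
    intro ind pw
    rw [show ((0:Nat):Int) = 0 by rfl]
    rw [show PySem.List.pyRange 0 (-1) (-1) = [0] from by decide]
    rcases cs with _ | ⟨c, t⟩
    · simp at hm
    · simp [PySem.List.pyGetD_zero_cons]
      ring
  | succ n ih =>
    intro ind pw
    have hcons : PySem.List.pyRange ((n+1 : Nat) : Int) (-1) (-1)
        = ((n+1 : Nat) : Int) :: PySem.List.pyRange (n : Int) (-1) (-1) := by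
      rw [PySem.List.pyRange_neg_one_eq_reverse, PySem.List.pyRange_neg_one_eq_reverse]
      rw [show (-1 : Int) + 1 = 0 by ring]
      rw [show ((n+1 : Nat) : Int) + 1 = (((n:Int)+1) + 1) by push_cast; ring]
      rw [PySem.List.pyRange_one_succ_right (by positivity : (0:Int) ≤ (n:Int)+1)]
      simp
    rw [hcons]
    simp only [List.foldl_cons]
    rw [ih (by omega)]
    have hget : PySem.List.pyGetD cs ((n+1 : Nat) : Int) 'a' = cs[n+1]'(by omega) := by
      rw [PySem.List.pyGetD_natCast]
      simp [List.getD_eq_getElem?_getD, List.getElem?_eq_getElem (by omega : n+1 < cs.length)]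
    have htake : cs.take (n + 1 + 1) = cs.take (n + 1) ++ [cs[n+1]'(by omega)] := by
      rw [List.take_add_one]
      simp [List.getElem?_eq_getElem (by omega : n+1 < cs.length)]
    rw [htake, List.foldl_append, hget]
    simp only [List.foldl_cons, List.foldl_nil]
    ring

-- the empty loop range for middle < 0
theorem pvRange_nil (a : Int) (ha : a < 0) : PySem.List.pyRange a (-1) (-1) = [] := by
  rw [PySem.List.pyRange_neg_one_eq_reverse]
  have : PySem.List.pyRange (-1 + 1) (a + 1) = [] := by
    apply List.eq_nil_of_length_eq_zero
    rw [PySem.List.length_pyRange_one]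
    omega
  rw [this]; rfl

-- ===== VERDICT (by name: the statement is the Claim_ definition above) =====
theorem number_of_palindromes_spec : Claim_equal_number_of_palindromes := by
  intro N K S _ hPre
  unfold Pre_number_of_palindromes at hPre
  unfold Spec_number_of_palindromes number_of_palindromes number_of_palindromes_alt
  simp only
  rw [pvSliceBridge S.toList _ hPre, List.reverse_reverse]
  have hhl : (PySem.List.slice S.toList none (some (PySem.Int.floordiv (N - 1) 2 + 1))).length
      ≤ S.toList.length := by
    rw [pvHalfTake]
    simp [List.length_take]
  rw [PySem.List.slice_from _ (by omega :
        (0:Int) ≤ (S.toList.length : Int) -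
          (PySem.List.slice S.toList none (some (PySem.Int.floordiv (N - 1) 2 + 1))).length)]
  have htn : ((S.toList.length : Int) -
      (PySem.List.slice S.toList none (some (PySem.Int.floordiv (N - 1) 2 + 1))).length).toNat
      = S.toList.length -
        (PySem.List.slice S.toList none (some (PySem.Int.floordiv (N - 1) 2 + 1))).length := by
    omega
  rw [htn]
  by_cases hge : 0 ≤ PySem.Int.floordiv (N - 1) 2
  · obtain ⟨m, hm⟩ : ∃ m : Nat, PySem.Int.floordiv (N - 1) 2 = (m : Int) :=
      ⟨(PySem.Int.floordiv (N - 1) 2).toNat, (Int.toNat_of_nonneg hge).symm⟩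
    rw [hm] at hPre ⊢
    have hmlen : m < S.toList.length := by exact_mod_cast hPre
    rw [pvHorner S.toList K m hmlen]
    have hslice : PySem.List.slice S.toList none (some ((m:Int) + 1)) = S.toList.take (m+1) := by
      rw [show ((m:Int) + 1) = ((m+1 : Nat) : Int) by push_cast; ring]
      rw [PySem.List.slice_to_natCast]
    rw [hslice, if_neg (by omega : ¬ ((m:Int) < 0)), pvHalfValue_eq]
    split_ifs with hc
    · congr 1; ring
    · congr 1; ring
  · rw [pvRange_nil _ (by omega)]
    simp only [List.foldl_nil, if_pos (by omega : PySem.Int.floordiv (N - 1) 2 < 0)]
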